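-- pv_equiv track=rewrite | github.com/satadisha/ELTweetTracker | ELTweetTracker/module_capital_punct.py | consecutive_cap
-- ===== SOURCE A (Python) =====
-- from itertools import groupby
-- from operator import itemgetter
--
-- prep_list=["in","at","of","on","and","by"] #includes common conjunction as well
--
-- article_list=["a","an","the"]
--
-- def consecutive_cap(tweetWordList_cappos,tweetWordList):
--     output=[]
--     #identifies consecutive numbers in the sequence
--     for k, g in groupby(enumerate(tweetWordList_cappos), lambda element: element[0]-element[1]):
--         output.append(list(map(itemgetter(1), g)))
--     count=0
--     if output:
--         final_output=[output[0]]
--         for first, second in (zip(output,output[1:])):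
--             if ((second[0]-first[-1])==2) & (tweetWordList[first[-1]+1].lower() in prep_list):
--                 (final_output[-1]).extend([first[-1]+1]+second)
--             elif((second[0]-first[-1])==3) & (tweetWordList[first[-1]+1].lower() in prep_list)& (tweetWordList[first[-1]+2].lower() in article_list):
--                 (final_output[-1]).extend([first[-1]+1]+[first[-1]+2]+second)
--             else:
--                 final_output.append(second)
--                 #merge_positions.append(False)
--     else:
--         final_output=[]
--
--     return final_output
-- ===== SOURCE B (Python) =====
-- prep_list = ["in", "at", "of", "on", "and", "by"]
--
-- article_list = ["a", "an", "the"]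
--
--
-- def consecutive_cap(tweetWordList_cappos, tweetWordList):
--     # Single left-to-right pass maintaining the current (merged) group;
--     # no pre-grouping with groupby and no pairwise zip over the groups.
--     groups = []
--     cur = None
--     for pos in tweetWordList_cappos:
--         if cur is None:
--             cur = [pos]
--             continue
--         prev = cur[-1]
--         d = pos - prev
--         if d == 1:
--             cur.append(pos)
--         elif d == 2 and tweetWordList[prev + 1].lower() in prep_list:
--             cur += [prev + 1, pos]
--         elif d == 3 and tweetWordList[prev + 1].lower() in prep_list \
--                 and tweetWordList[prev + 2].lower() in article_list:
--             cur += [prev + 1, prev + 2, pos]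
--         else:
--             groups.append(cur)
--             cur = [pos]
--     if cur is not None:
--         groups.append(cur)
--     return groups
-- ===== Notes on version B (the rewrite author's own statement) =====
-- stated objective: simpler
-- what changed: Replaced A's two-phase pipeline (groupby(enumerate(...)) into maximal consecutive runs, then a pairwise zip over adjacent runs that mutates the last merged group) by a single left-to-right pass that maintains the current group directly and decides append/merge/close from the gap to the group's last element.
import Mathlib
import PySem

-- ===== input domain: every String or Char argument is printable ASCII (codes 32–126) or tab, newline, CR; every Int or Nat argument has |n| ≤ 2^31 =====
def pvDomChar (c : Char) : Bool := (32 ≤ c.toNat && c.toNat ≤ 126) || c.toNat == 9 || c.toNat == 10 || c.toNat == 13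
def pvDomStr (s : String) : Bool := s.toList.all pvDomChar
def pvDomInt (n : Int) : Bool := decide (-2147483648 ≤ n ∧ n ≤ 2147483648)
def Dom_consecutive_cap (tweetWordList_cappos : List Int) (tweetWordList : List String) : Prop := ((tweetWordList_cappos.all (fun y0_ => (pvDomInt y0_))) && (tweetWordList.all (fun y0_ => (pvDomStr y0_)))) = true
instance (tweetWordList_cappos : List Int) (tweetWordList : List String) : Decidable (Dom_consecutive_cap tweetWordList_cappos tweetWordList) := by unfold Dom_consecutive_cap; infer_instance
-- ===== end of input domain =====

-- B replaces A's groupby-into-runs + pairwise-zip merging with one single pass that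
-- maintains the current group directly (objective: simpler decomposition, same cost).


-- module constants shared by both Pythons
def prep_list : List String := ["in", "at", "of", "on", "and", "by"]
def article_list : List String := ["a", "an", "the"]

-- tweetWordList[i].lower() — the .getD "" default is unreachable under Pre_ (index in range there);
-- Python raises IndexError exactly where pyGet? is none, and those inputs are outside Pre_.
def pvWordAt (words : List String) (i : Int) : String :=
  PySem.Str.lower ((PySem.List.pyGet? words i).getD "")

-- ===== PORT A =====
-- groupby(enumerate(cappos), lambda e: e[0]-e[1]) : carry the current key k and current group cur
def pvGroupbyGo (k : Int) (cur : List Int) : List (Int × Int) → List (List Int)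
  | [] => [cur]
  | (i, p) :: rest =>
      if (i - p) == k then pvGroupbyGo k (cur ++ [p]) rest
      else cur :: pvGroupbyGo (i - p) [p] rest

def pvRuns (cappos : List Int) : List (List Int) :=
  match PySem.List.enumerate cappos with
  | [] => []
  | (i, p) :: rest => pvGroupbyGo (i - p) [p] rest

-- final_output[-1].extend(xs) — fin is nonempty whenever this is called
def pvExtendLast (fin : List (List Int)) (xs : List Int) : List (List Int) :=
  fin.dropLast ++ [((PySem.List.pyGet? fin (-1)).getD []) ++ xs]

-- the `for first, second in zip(output, output[1:])` loop, carrying `first`.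
-- Python's bitwise `&` on bools is value-equal to `&&`; its only difference is that `&` does not
-- short-circuit, which can only raise (IndexError) — those inputs are outside Pre_.
def pvMergeGo (words : List String) (fin : List (List Int)) (first : List Int) : List (List Int) → List (List Int)
  | [] => fin
  | second :: rest =>
      let lastF := (PySem.List.pyGet? first (-1)).getD 0
      let s0 := (PySem.List.pyGet? second 0).getD 0
      if ((s0 - lastF) == 2) && prep_list.contains (pvWordAt words (lastF + 1)) then
        pvMergeGo words (pvExtendLast fin ([lastF + 1] ++ second)) second rest
      else if ((s0 - lastF) == 3) && prep_list.contains (pvWordAt words (lastF + 1))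
              && article_list.contains (pvWordAt words (lastF + 2)) then
        pvMergeGo words (pvExtendLast fin ([lastF + 1, lastF + 2] ++ second)) second rest
      else
        pvMergeGo words (fin ++ [second]) second rest

def consecutive_cap (tweetWordList_cappos : List Int) (tweetWordList : List String) : List (List Int) :=
  match pvRuns tweetWordList_cappos with
  | [] => []
  | h :: t => pvMergeGo tweetWordList [h] h t

-- ===== PORT B =====
-- single pass: groups = closed groups, cur = current group (Python's `cur` list)
def pvAltGo (words : List String) (groups : List (List Int)) (cur : List Int) : List Int → List (List Int)
  | [] => groups ++ [cur]
  | pos :: rest =>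
      let prev := (PySem.List.pyGet? cur (-1)).getD 0
      let d := pos - prev
      if d == 1 then pvAltGo words groups (cur ++ [pos]) rest
      else if (d == 2) && prep_list.contains (pvWordAt words (prev + 1)) then
        pvAltGo words groups (cur ++ [prev + 1, pos]) rest
      else if (d == 3) && prep_list.contains (pvWordAt words (prev + 1))
              && article_list.contains (pvWordAt words (prev + 2)) then
        pvAltGo words groups (cur ++ [prev + 1, prev + 2, pos]) rest
      else pvAltGo words (groups ++ [cur]) [pos] rest

def consecutive_cap_alt (tweetWordList_cappos : List Int) (tweetWordList : List String) : List (List Int) :=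
  match tweetWordList_cappos with
  | [] => []
  | p :: rest => pvAltGo tweetWordList [] [p] rest

-- ===== PRECONDITION & SPEC =====
-- Pre_ is exactly the set of inputs on which Python A returns normally: A raises (only) an
-- IndexError, at a run boundary (adjacent positions a,b with b != a+1) when the word index a+1 —
-- or a+2, whose lookup A's non-short-circuiting `&` always evaluates unless the gap-2 preposition
-- merge already fired — falls outside Python's index range [-len, len).
def Pre_consecutive_cap (tweetWordList_cappos : List Int) (tweetWordList : List String) : Prop :=
  ∀ pr ∈ tweetWordList_cappos.zip tweetWordList_cappos.tail, pr.2 ≠ pr.1 + 1 →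
    PySem.Raise.InRange tweetWordList.length (pr.1 + 1) ∧
    ((pr.2 - pr.1 = 2 ∧ prep_list.contains (pvWordAt tweetWordList (pr.1 + 1)) = true) ∨
      PySem.Raise.InRange tweetWordList.length (pr.1 + 2))
instance (tweetWordList_cappos : List Int) (tweetWordList : List String) : Decidable (Pre_consecutive_cap tweetWordList_cappos tweetWordList) := by unfold Pre_consecutive_cap; infer_instance

def pvWitness_consecutive_cap : List Int × List String :=
  ([0, 2, 4], ["Aa", "of", "Bb", "the", "Cc"])

def Spec_consecutive_cap (tweetWordList_cappos : List Int) (tweetWordList : List String) (out : List (List Int)) : Prop := out = consecutive_cap_alt tweetWordList_cappos tweetWordList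
instance (tweetWordList_cappos : List Int) (tweetWordList : List String) (out : List (List Int)) : Decidable (Spec_consecutive_cap tweetWordList_cappos tweetWordList out) := by unfold Spec_consecutive_cap; infer_instance

-- ===== CLAIM (what is proved, stated in full; the proofs are below) =====
def Claim_equal_consecutive_cap : Prop := ∀ (tweetWordList_cappos : List Int) (tweetWordList : List String), Dom_consecutive_cap tweetWordList_cappos tweetWordList → Pre_consecutive_cap tweetWordList_cappos tweetWordList → Spec_consecutive_cap tweetWordList_cappos tweetWordList (consecutive_cap tweetWordList_cappos tweetWordList)

-- ===== LEMMAS AND PROOFS =====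

-- proof-side view of A's grouping: split into maximal successor runs, tracking the last element q
def segGo (q : Int) (cur : List Int) : List Int → List (List Int)
  | [] => [cur]
  | p :: rest => if p = q + 1 then segGo p (cur ++ [p]) rest else cur :: segGo p [p] rest

def chainTake (q : Int) : List Int → List Int
  | [] => []
  | p :: rest => if p = q + 1 then p :: chainTake p rest else []

def runsAfter (q : Int) : List Int → List (List Int)
  | [] => []
  | p :: rest => if p = q + 1 then runsAfter p rest else segGo p [p] rest

theorem seg_split (rest : List Int) : ∀ q cur,
    segGo q cur rest = (cur ++ chainTake q rest) :: runsAfter q rest := by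
  induction rest with
  | nil => intro q cur; simp [segGo, chainTake, runsAfter]
  | cons p rest ih =>
      intro q cur
      by_cases h : p = q + 1
      · simp [segGo, chainTake, runsAfter, h, ih]
      · simp [segGo, chainTake, runsAfter, h]

theorem groupby_eq_segGo (xs : List Int) : ∀ (s q : Int) (cur : List Int),
    pvGroupbyGo ((s - 1) - q) cur (PySem.List.enumerate xs s) = segGo q cur xs := by
  induction xs with
  | nil => intro s q cur; simp [PySem.List.enumerate_nil, pvGroupbyGo, segGo]
  | cons p xs ih =>
      intro s q cur
      rw [PySem.List.enumerate_cons]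
      by_cases h : p = q + 1
      · have hcond : ((s - p) == (s - 1 - q)) = true := by simp only [beq_iff_eq]; omega
        have hkey : s - 1 - q = (s + 1 - 1) - p := by omega
        simp only [pvGroupbyGo]
        rw [if_pos hcond, segGo, if_pos h, hkey, ih]
      · have hcond : ¬ (((s - p) == (s - 1 - q)) = true) := by
          simp only [beq_iff_eq]; omega
        have hkey : s - p = (s + 1 - 1) - p := by omega
        simp only [pvGroupbyGo]
        rw [if_neg hcond, segGo, if_neg h, hkey, ih]

theorem lastD_concat (l : List Int) (a : Int) : ((l ++ [a]).getLast?.getD 0) = a := by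
  simp

theorem lastD_append_right (xs : List Int) (p : Int) (ys : List Int) :
    ((xs ++ p :: ys).getLast?.getD 0) = ((p :: ys).getLast?.getD 0) := by
  rw [List.getLast?_append_of_ne_nil xs (by simp)]

theorem extendLast_concat (groups : List (List Int)) (cur xs : List Int) :
    pvExtendLast (groups ++ [cur]) xs = groups ++ [cur ++ xs] := by
  simp [pvExtendLast, PySem.List.pyGet?_neg_one_append_singleton]

-- main bridge: A's run-level merging = B's element-level pass, from any aligned state
-- (the invariant is that `first`, A's previous run, ends at the same position as B's
-- current group will once it has absorbed the pending successor chain).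
theorem merge_eq_alt (words : List String) (rest : List Int) : ∀ (cur : List Int)
    (groups : List (List Int)) (first : List Int),
    (first.getLast?.getD 0) = ((cur ++ chainTake (cur.getLast?.getD 0) rest).getLast?.getD 0) →
    pvMergeGo words (groups ++ [cur ++ chainTake (cur.getLast?.getD 0) rest]) first
        (runsAfter (cur.getLast?.getD 0) rest)
      = pvAltGo words groups cur rest := by
  induction rest with
  | nil => intro cur groups first _; simp [chainTake, runsAfter, pvMergeGo, pvAltGo]
  | cons p rest ih =>
      intro cur groups first hfirst
      set q : Int := cur.getLast?.getD 0 with hq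
      by_cases hp : p = q + 1
      · -- run continues: A's side is unchanged, B appends pos to cur
        have h1 : chainTake q (p :: rest) = p :: chainTake p rest := by simp [chainTake, hp]
        have h2 : runsAfter q (p :: rest) = runsAfter p rest := by simp [runsAfter, hp]
        have hlast : ((cur ++ [p]).getLast?.getD 0) = p := lastD_concat cur p
        have hassoc : cur ++ (p :: chainTake p rest) = (cur ++ [p]) ++ chainTake p rest := by simp
        have hd : ((p - q) == 1) = true := by simp only [beq_iff_eq]; omega
        rw [h1, hassoc] at hfirst
        rw [h1, h2, hassoc]
        have IH := ih (cur ++ [p]) groups first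
        rw [hlast] at IH
        rw [IH hfirst]
        simp only [pvAltGo, PySem.List.pyGet?_neg_one, ← hq]
        rw [if_pos hd]
      · -- run boundary: A consumes the whole next run at once, B decides on its head p
        have h1 : chainTake q (p :: rest) = [] := by simp [chainTake, hp]
        have h2 : runsAfter q (p :: rest) = (p :: chainTake p rest) :: runsAfter p rest := by
          rw [runsAfter, if_neg hp, seg_split]; simp
        have hfq : (first.getLast?.getD 0) = q := by rw [hfirst, h1]; simp [hq]
        have hd1 : ¬ (((p - q) == 1) = true) := by simp only [beq_iff_eq]; omega
        rw [h1, h2]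
        simp only [List.append_nil]
        simp only [pvMergeGo, pvAltGo, PySem.List.pyGet?_neg_one, ← hq, hfq,
          PySem.List.pyGet?_zero_cons, Option.getD_some]
        rw [if_neg hd1]
        by_cases hc2 : (((p - q) == 2) && prep_list.contains (pvWordAt words (q + 1))) = true
        · rw [if_pos hc2, if_pos hc2, extendLast_concat]
          have hlast' : ((cur ++ [q + 1, p]).getLast?.getD 0) = p := by
            rw [show cur ++ [q + 1, p] = (cur ++ [q + 1]) ++ [p] by simp, lastD_concat]
          have hassoc : (cur ++ [q + 1, p]) ++ chainTake p rest
              = (cur ++ [q + 1]) ++ (p :: chainTake p rest) := by simp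
          have IH := ih (cur ++ [q + 1, p]) groups (p :: chainTake p rest)
          rw [hlast'] at IH
          have IH' := IH (by rw [hassoc, lastD_append_right])
          rw [hassoc] at IH'
          simpa using IH'
        · rw [if_neg hc2, if_neg hc2]
          by_cases hc3 : (((p - q) == 3) && prep_list.contains (pvWordAt words (q + 1))
              && article_list.contains (pvWordAt words (q + 2))) = true
          · rw [if_pos hc3, if_pos hc3, extendLast_concat]
            have hlast' : ((cur ++ [q + 1, q + 2, p]).getLast?.getD 0) = p := by
              rw [show cur ++ [q + 1, q + 2, p] = (cur ++ [q + 1, q + 2]) ++ [p] by simp,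
                lastD_concat]
            have hassoc : (cur ++ [q + 1, q + 2, p]) ++ chainTake p rest
                = (cur ++ [q + 1, q + 2]) ++ (p :: chainTake p rest) := by simp
            have IH := ih (cur ++ [q + 1, q + 2, p]) groups (p :: chainTake p rest)
            rw [hlast'] at IH
            have IH' := IH (by rw [hassoc, lastD_append_right])
            rw [hassoc] at IH'
            simpa using IH'
          · rw [if_neg hc3, if_neg hc3]
            have hlast' : (([p] : List Int).getLast?.getD 0) = p := by simp
            have IH := ih [p] (groups ++ [cur]) (p :: chainTake p rest)
            rw [hlast'] at IH
            have IH' := IH (by simp)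
            simpa using IH'

theorem consecutive_cap_eq (cappos : List Int) (words : List String) :
    consecutive_cap cappos words = consecutive_cap_alt cappos words := by
  cases cappos with
  | nil => simp [consecutive_cap, consecutive_cap_alt, pvRuns, PySem.List.enumerate_nil]
  | cons p rest =>
      have hruns : pvRuns (p :: rest) = segGo p [p] rest := by
        simp only [pvRuns, PySem.List.enumerate_cons]
        rw [show (0 : Int) - p = (1 - 1) - p by ring, show (0 : Int) + 1 = 1 by ring,
          groupby_eq_segGo]
      have hlp : (([p] : List Int).getLast?.getD 0) = p := by simp
      have hbridge := merge_eq_alt words rest [p] [] ([p] ++ chainTake p rest) (by rw [hlp])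
      rw [hlp] at hbridge
      simp only [List.nil_append] at hbridge
      rw [consecutive_cap, hruns, seg_split]
      exact hbridge

-- ===== VERDICT (by name: the statement is the Claim_ definition above) =====
theorem consecutive_cap_spec : Claim_equal_consecutive_cap := by
  intro cappos words _ _
  unfold Spec_consecutive_cap
  exact consecutive_cap_eq cappos words
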